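-- pv_equiv track=rewrite | github.com/Tina2004007/FDS-DongRabbaniSolazzo | model_submission_3.py | extract_final_pokemon_status
-- ===== SOURCE A (Python) =====
-- def extract_final_pokemon_status(timeline):
--     """
--     Extracts the final status of Pokémon from the battle timeline.
--
--     Returns:
--     - p1_alive_pokemon_names: Set of P1's final surviving Pokémon names
--     - p1_fnt_pokemon_names: Set of P1's final fainted Pokémon names
--     - p2_alive_pokemon_names: Set of P2's final surviving Pokémon names
--     """
--     p1_alive_pokemon_names = set()
--     p1_fnt_pokemon_names = set()
--     p2_alive_pokemon_names = set()
--     p1_last_status = {}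
--     p2_last_status = {}
--     for turn in timeline:
--         p1_pokemon_state = turn.get('p1_pokemon_state', {})
--         p1_pokemon_name = p1_pokemon_state.get('name', '')
--         if p1_pokemon_name:
--             p1_last_status[p1_pokemon_name] = p1_pokemon_state.get('status', 'nostatus')
--
--         p2_pokemon_state = turn.get('p2_pokemon_state', {})
--         p2_pokemon_name = p2_pokemon_state.get('name', '')
--         if p2_pokemon_name:
--             p2_last_status[p2_pokemon_name] = p2_pokemon_state.get('status', 'nostatus')
--
--     for pokemon_name, status in p1_last_status.items():
--         if status == 'fnt':
--             p1_fnt_pokemon_names.add(pokemon_name)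
--         else:
--             p1_alive_pokemon_names.add(pokemon_name)
--
--     for pokemon_name, status in p2_last_status.items():
--         if status != 'fnt':
--             p2_alive_pokemon_names.add(pokemon_name)
--
--     return p1_alive_pokemon_names, p1_fnt_pokemon_names, p2_alive_pokemon_names
-- ===== SOURCE B (Python) =====
-- def extract_final_pokemon_status(timeline):
--     def events(key):
--         evs = []
--         for turn in timeline:
--             state = turn.get(key, {})
--             name = state.get('name', '')
--             if name:
--                 evs.append((name, state.get('status', 'nostatus')))
--         return evs
--
--     def final_pairs(evs):
--         rev = evs[::-1]
--         names = list(dict.fromkeys(name for name, _ in evs))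
--         return [(n, next(s for m, s in rev if m == n)) for n in names]
--
--     p1 = final_pairs(events('p1_pokemon_state'))
--     p2 = final_pairs(events('p2_pokemon_state'))
--     p1_alive = {n for n, s in p1 if s != 'fnt'}
--     p1_fnt = {n for n, s in p1 if s == 'fnt'}
--     p2_alive = {n for n, s in p2 if s != 'fnt'}
--     return p1_alive, p1_fnt, p2_alive
-- ===== Notes on version B (the rewrite author's own statement) =====
-- stated objective: alternative
-- what changed: Replaces A's single forward pass that interleaves two mutable last-status dicts followed by two classification loops with a per-player pipeline: extract the player's (name,status) event list, pair each first-occurrence-deduped name with the status found by searching the reversed event list, then split by status with comprehensions.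
import Mathlib
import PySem

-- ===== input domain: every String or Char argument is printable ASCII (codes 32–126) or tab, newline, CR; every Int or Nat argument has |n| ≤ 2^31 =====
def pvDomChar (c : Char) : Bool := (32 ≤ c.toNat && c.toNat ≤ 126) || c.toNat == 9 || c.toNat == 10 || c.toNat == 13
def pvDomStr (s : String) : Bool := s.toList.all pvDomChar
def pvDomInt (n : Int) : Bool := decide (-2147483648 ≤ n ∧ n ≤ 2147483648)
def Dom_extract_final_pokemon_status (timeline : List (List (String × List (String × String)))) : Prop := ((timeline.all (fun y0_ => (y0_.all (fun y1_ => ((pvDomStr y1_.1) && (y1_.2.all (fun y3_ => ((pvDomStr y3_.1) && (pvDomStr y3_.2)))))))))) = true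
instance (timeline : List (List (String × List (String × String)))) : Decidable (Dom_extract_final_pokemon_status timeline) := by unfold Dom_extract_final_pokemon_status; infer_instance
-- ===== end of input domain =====

-- B is an alternative decomposition (per-player event list, reverse search for last status,
-- comprehension-style splits) of the same extraction; equivalence of return values is proved.

-- ===== PORT A =====
-- dict.get(k, dflt) on an association list (first match wins, per the type convention)
def pvGetD {ν : Type} (l : List (String × ν)) (k : String) (dflt : ν) : ν :=
  match l.find? (fun p => p.1 == k) with
  | some p => p.2
  | none => dflt

def extract_final_pokemon_status (timeline : List (List (String × List (String × String)))) : List String × List String × List String :=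
  -- forward pass maintaining both players' last-status dicts
  let ds := timeline.foldl (fun (st : PySem.Dict String String × PySem.Dict String String) turn =>
      let p1_state := pvGetD turn "p1_pokemon_state" []
      let p1_name := pvGetD p1_state "name" ""
      let d1 := if p1_name ≠ "" then st.1.insert p1_name (pvGetD p1_state "status" "nostatus") else st.1
      let p2_state := pvGetD turn "p2_pokemon_state" []
      let p2_name := pvGetD p2_state "name" ""
      let d2 := if p2_name ≠ "" then st.2.insert p2_name (pvGetD p2_state "status" "nostatus") else st.2
      (d1, d2)) (PySem.Dict.empty, PySem.Dict.empty)
  -- classification loops over the dicts' items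
  let p1sets := ds.1.items.foldl (fun (s : PySem.Set String × PySem.Set String) p =>
      if p.2 == "fnt" then (s.1, PySem.Set.add s.2 p.1) else (PySem.Set.add s.1 p.1, s.2)) ([], [])
  let p2alive := ds.2.items.foldl (fun (s : PySem.Set String) p =>
      if p.2 != "fnt" then PySem.Set.add s p.1 else s) []
  (p1sets.1, p1sets.2, p2alive)

-- ===== PORT B =====
-- events(key): the player's (name, status) list in timeline order, empty names skipped
def pvEvents (timeline : List (List (String × List (String × String)))) (key : String) : List (String × String) :=
  timeline.foldl (fun evs turn =>
    let state := pvGetD turn key []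
    let name := pvGetD state "name" ""
    if name ≠ "" then evs ++ [(name, pvGetD state "status" "nostatus")] else evs) []

-- final_pairs(evs): first-occurrence-deduped names, each with the status of its last event
-- (the 'next(...)' generator always finds a match since names come from evs; getD "" is unreachable)
def pvFinalPairs (evs : List (String × String)) : List (String × String) :=
  let rev := evs.reverse
  let names := PySem.List.dedup (evs.map (·.1))
  names.map (fun n => (n, ((rev.find? (fun p => p.1 == n)).map (·.2)).getD ""))

def extract_final_pokemon_status_alt (timeline : List (List (String × List (String × String)))) : List String × List String × List String :=
  let p1 := pvFinalPairs (pvEvents timeline "p1_pokemon_state")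
  let p2 := pvFinalPairs (pvEvents timeline "p2_pokemon_state")
  (PySem.Set.ofList ((p1.filter (fun p => p.2 != "fnt")).map (·.1)),
   PySem.Set.ofList ((p1.filter (fun p => p.2 == "fnt")).map (·.1)),
   PySem.Set.ofList ((p2.filter (fun p => p.2 != "fnt")).map (·.1)))

-- ===== PRECONDITION & SPEC =====
def Spec_extract_final_pokemon_status (timeline : List (List (String × List (String × String)))) (out : List String × List String × List String) : Prop := out = extract_final_pokemon_status_alt timeline
instance (timeline : List (List (String × List (String × String)))) (out : List String × List String × List String) : Decidable (Spec_extract_final_pokemon_status timeline out) := by unfold Spec_extract_final_pokemon_status; infer_instance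

-- ===== CLAIM (what is proved, stated in full; the proofs are below) =====
def Claim_equal_extract_final_pokemon_status : Prop := ∀ (timeline : List (List (String × List (String × String)))), Dom_extract_final_pokemon_status timeline → Spec_extract_final_pokemon_status timeline (extract_final_pokemon_status timeline)

-- ===== LEMMAS AND PROOFS =====

-- A's dict-building fold, per player
def pvInsFold (evs : List (String × String)) (d : PySem.Dict String String) : PySem.Dict String String :=
  evs.foldl (fun d p => d.insert p.1 p.2) d

-- an appending fold distributes over its accumulator
lemma pvFoldlAppendAcc {α β : Type} (g : List β → α → List β)
    (hg : ∀ acc x, g acc x = acc ++ g [] x) :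
    ∀ (l : List α) (acc : List β), l.foldl g acc = acc ++ l.foldl g [] := by
  intro l
  induction l with
  | nil => intro acc; simp
  | cons y l ih =>
    intro acc
    rw [List.foldl_cons, List.foldl_cons, ih, ih (g [] y), hg acc y, List.append_assoc]

-- the event-accumulating fold distributes over its accumulator
lemma pvEvents_acc (timeline : List (List (String × List (String × String)))) (key : String)
    (acc : List (String × String)) :
    timeline.foldl (fun evs turn =>
      let state := pvGetD turn key []
      let name := pvGetD state "name" ""
      if name ≠ "" then evs ++ [(name, pvGetD state "status" "nostatus")] else evs) acc
    = acc ++ pvEvents timeline key := by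
  exact pvFoldlAppendAcc _ (fun acc x => by dsimp only; split_ifs <;> simp) timeline acc

lemma pvEvents_cons (turn : List (String × List (String × String)))
    (tl : List (List (String × List (String × String)))) (key : String) :
    pvEvents (turn :: tl) key
    = (if pvGetD (pvGetD turn key []) "name" "" ≠ "" then
        [(pvGetD (pvGetD turn key []) "name" "", pvGetD (pvGetD turn key []) "status" "nostatus")]
       else []) ++ pvEvents tl key := by
  show List.foldl _ _ tl = _
  rw [pvEvents_acc]
  by_cases h : pvGetD (pvGetD turn key []) "name" "" = "" <;> simp [h]

-- A's interleaved fold over the timeline equals the two per-player folds over the event lists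
lemma pvFoldA (timeline : List (List (String × List (String × String)))) :
    timeline.foldl (fun (st : PySem.Dict String String × PySem.Dict String String) turn =>
      let p1_state := pvGetD turn "p1_pokemon_state" []
      let p1_name := pvGetD p1_state "name" ""
      let d1 := if p1_name ≠ "" then st.1.insert p1_name (pvGetD p1_state "status" "nostatus") else st.1
      let p2_state := pvGetD turn "p2_pokemon_state" []
      let p2_name := pvGetD p2_state "name" ""
      let d2 := if p2_name ≠ "" then st.2.insert p2_name (pvGetD p2_state "status" "nostatus") else st.2
      (d1, d2)) (PySem.Dict.empty, PySem.Dict.empty)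
    = (pvInsFold (pvEvents timeline "p1_pokemon_state") PySem.Dict.empty,
       pvInsFold (pvEvents timeline "p2_pokemon_state") PySem.Dict.empty) := by
  suffices h : ∀ (tl : List (List (String × List (String × String)))) (d1 d2 : PySem.Dict String String),
      tl.foldl (fun (st : PySem.Dict String String × PySem.Dict String String) turn =>
        let p1_state := pvGetD turn "p1_pokemon_state" []
        let p1_name := pvGetD p1_state "name" ""
        let d1 := if p1_name ≠ "" then st.1.insert p1_name (pvGetD p1_state "status" "nostatus") else st.1
        let p2_state := pvGetD turn "p2_pokemon_state" []
        let p2_name := pvGetD p2_state "name" ""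
        let d2 := if p2_name ≠ "" then st.2.insert p2_name (pvGetD p2_state "status" "nostatus") else st.2
        (d1, d2)) (d1, d2)
      = (pvInsFold (pvEvents tl "p1_pokemon_state") d1,
         pvInsFold (pvEvents tl "p2_pokemon_state") d2) by
    exact h timeline _ _
  intro tl
  induction tl with
  | nil => intro d1 d2; simp [pvEvents, pvInsFold]
  | cons turn tl ih =>
    intro d1 d2
    rw [List.foldl_cons, ih, pvEvents_cons, pvEvents_cons]
    simp only [pvInsFold, List.foldl_append]
    split_ifs <;> simp

-- keys of the per-player fold
lemma pvKeysInsFold (evs : List (String × String)) :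
    (pvInsFold evs PySem.Dict.empty).keys = PySem.List.dedup (evs.map (·.1)) := by
  unfold pvInsFold
  rw [PySem.Dict.keys_foldl_insert_key evs (fun p => p.1) (fun _ p => p.2) PySem.Dict.empty,
    PySem.Dict.keys_empty, PySem.Set.update_nil_left, PySem.List.dedup_eq_ofList]

-- CORE: the items of A's last-status dict are exactly B's final pairs
lemma pvItemsInsFold (evs : List (String × String)) :
    (pvInsFold evs PySem.Dict.empty).items = pvFinalPairs evs := by
  induction evs using List.reverseRecOn with
  | nil => rfl
  | append_singleton evs e ih =>
    have hfold : pvInsFold (evs ++ [e]) PySem.Dict.empty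
        = (pvInsFold evs PySem.Dict.empty).insert e.1 e.2 := by
      simp [pvInsFold, List.foldl_append]
    have hcont : (pvInsFold evs PySem.Dict.empty).contains e.1 = decide (e.1 ∈ evs.map (·.1)) := by
      by_cases hm : e.1 ∈ evs.map (·.1)
      · simp only [hm, decide_true]
        exact (PySem.Dict.contains_iff_mem_keys _ _).mpr
          (by rw [pvKeysInsFold]; exact (PySem.List.mem_dedup _ _).mpr hm)
      · simp only [hm, decide_false]
        rw [← Bool.not_eq_true]
        intro hc
        exact hm ((PySem.List.mem_dedup _ _).mp (by rw [← pvKeysInsFold evs]; exact (PySem.Dict.contains_iff_mem_keys _ _).mp hc))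
    have hdedup : PySem.List.dedup ((evs ++ [e]).map (·.1))
        = if e.1 ∈ evs.map (·.1) then PySem.List.dedup (evs.map (·.1))
          else PySem.List.dedup (evs.map (·.1)) ++ [e.1] := by
      rw [PySem.List.dedup_eq_ofList, PySem.List.dedup_eq_ofList, List.map_append]
      simp only [List.map_cons, List.map_nil]
      rw [PySem.Set.ofList_append_singleton, PySem.Set.add_eq_ite]
      by_cases hm : e.1 ∈ evs.map (·.1)
      · rw [if_pos ((PySem.Set.mem_ofList _ _).mpr hm), if_pos hm]
      · rw [if_neg (fun h => hm ((PySem.Set.mem_ofList _ _).mp h)), if_neg hm]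
    rw [hfold, PySem.Dict.items_insert, ih, hcont]
    unfold pvFinalPairs
    simp only [List.reverse_append, List.reverse_cons, List.reverse_nil, List.nil_append,
      List.cons_append, hdedup]
    by_cases hm : e.1 ∈ evs.map (·.1)
    · rw [if_pos hm, if_pos (by simpa using hm), List.map_map]
      refine List.map_congr_left (fun n _ => ?_)
      by_cases h : n = e.1
      · subst h
        rw [List.find?_cons_of_pos (by exact beq_self_eq_true e.1)]
        simp
      · rw [List.find?_cons_of_neg (by exact fun hc => h (eq_of_beq hc).symm)]
        simp [h]
    · rw [if_neg hm, if_neg (by simpa using hm), List.map_append]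
      congr 1
      · refine List.map_congr_left (fun n hn => ?_)
        have hne : e.1 ≠ n := fun hh => hm (by rw [hh]; exact (PySem.List.mem_dedup _ _).mp hn)
        rw [List.find?_cons_of_neg (by simp [hne])]
      · simp only [List.map_cons, List.map_nil]
        rw [List.find?_cons_of_pos (by exact beq_self_eq_true e.1)]
        simp

lemma pvSplitFold (l : List (String × String)) (a b : List String)
    (hnd : (l.map (·.1)).Nodup)
    (hfresh : ∀ n ∈ l.map (·.1), n ∉ a ∧ n ∉ b) :
    l.foldl (fun (s : PySem.Set String × PySem.Set String) p =>
      if p.2 == "fnt" then (s.1, PySem.Set.add s.2 p.1) else (PySem.Set.add s.1 p.1, s.2)) (a, b)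
    = (a ++ (l.filter (fun p => p.2 != "fnt")).map (·.1),
       b ++ (l.filter (fun p => p.2 == "fnt")).map (·.1)) := by
  induction l generalizing a b with
  | nil => simp
  | cons p l ih =>
    have hhead := hfresh p.1 (by simp)
    have hnd' : (l.map (·.1)).Nodup := (List.nodup_cons.mp hnd).2
    have hne : ∀ n ∈ l.map (·.1), n ≠ p.1 :=
      fun n hn hc => (List.nodup_cons.mp hnd).1 (by simpa using (hc ▸ hn : p.1 ∈ List.map (fun x => x.1) l))
    rw [List.foldl_cons]
    by_cases hs : p.2 = "fnt"
    · rw [if_pos (by simp [hs])]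
      rw [PySem.Set.add_of_not_mem hhead.2]
      rw [ih a (b ++ [p.1]) hnd'
        (fun n hn => ⟨(hfresh n (by simp [hn])).1,
          by simp [(hfresh n (by simp [hn])).2, hne n hn]⟩)]
      simp [hs]
    · rw [if_neg (by simp [hs])]
      rw [PySem.Set.add_of_not_mem hhead.1]
      rw [ih (a ++ [p.1]) b hnd'
        (fun n hn => ⟨by simp [(hfresh n (by simp [hn])).1, hne n hn],
          (hfresh n (by simp [hn])).2⟩)]
      simp [hs]

lemma pvAliveFold (l : List (String × String)) (a : List String)
    (hnd : (l.map (·.1)).Nodup)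
    (hfresh : ∀ n ∈ l.map (·.1), n ∉ a) :
    l.foldl (fun (s : PySem.Set String) p => if p.2 != "fnt" then PySem.Set.add s p.1 else s) a
    = a ++ (l.filter (fun p => p.2 != "fnt")).map (·.1) := by
  induction l generalizing a with
  | nil => simp
  | cons p l ih =>
    have hnd' : (l.map (·.1)).Nodup := (List.nodup_cons.mp hnd).2
    have hne : ∀ n ∈ l.map (·.1), n ≠ p.1 :=
      fun n hn hc => (List.nodup_cons.mp hnd).1 (by simpa using (hc ▸ hn : p.1 ∈ List.map (fun x => x.1) l))
    rw [List.foldl_cons]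
    by_cases hs : p.2 = "fnt"
    · rw [if_neg (by simp [hs])]
      rw [ih a hnd' (fun n hn => hfresh n (by simp [hn]))]
      simp [hs]
    · rw [if_pos (by simp [hs])]
      rw [PySem.Set.add_of_not_mem (hfresh p.1 (by simp))]
      rw [ih (a ++ [p.1]) hnd'
        (fun n hn => by simp [hfresh n (by simp [hn]), hne n hn])]
      simp [hs]

lemma pvNodupFinalPairs (evs : List (String × String)) :
    ((pvFinalPairs evs).map (·.1)).Nodup := by
  unfold pvFinalPairs
  simp only [List.map_map]
  have : ((fun (p : String × String) => p.1) ∘ fun n =>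
      (n, ((List.find? (fun p => p.1 == n) evs.reverse).map (·.2)).getD "")) = id := rfl
  rw [this, List.map_id]
  exact PySem.List.nodup_dedup _

lemma pvNodupFilterMap (l : List (String × String)) (q : String × String → Bool)
    (h : (l.map (·.1)).Nodup) : ((l.filter q).map (·.1)).Nodup :=
  h.sublist (List.Sublist.map _ List.filter_sublist)

-- ===== VERDICT (by name: the statement is the Claim_ definition above) =====
theorem extract_final_pokemon_status_spec : Claim_equal_extract_final_pokemon_status := by
  intro timeline _
  show extract_final_pokemon_status timeline = extract_final_pokemon_status_alt timeline
  unfold extract_final_pokemon_status extract_final_pokemon_status_alt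
  rw [pvFoldA]
  simp only [pvItemsInsFold]
  rw [pvSplitFold _ [] [] (pvNodupFinalPairs _) (by simp),
      pvAliveFold _ [] (pvNodupFinalPairs _) (by simp)]
  simp only [List.nil_append]
  rw [PySem.Set.ofList_eq_self_of_nodup _ (pvNodupFilterMap _ _ (pvNodupFinalPairs _)),
      PySem.Set.ofList_eq_self_of_nodup _ (pvNodupFilterMap _ _ (pvNodupFinalPairs _)),
      PySem.Set.ofList_eq_self_of_nodup _ (pvNodupFilterMap _ _ (pvNodupFinalPairs _))]
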